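-- pv_equiv track=rewrite | github.com/ikkyu0714/word_based_cdd | concept_range_type.py | upper_or_lower_diff
-- ===== SOURCE A (Python) =====
-- def upper_or_lower_diff(common_layer, unique_keys):
--     upper_flag = False
--     lower_flag = False
--     for key in unique_keys:
--         # keyが共通の最小より小さい時 -> 上位の概念に差がある
--         if key < min(common_layer):
--             upper_flag = True
--         # keyが共通の最大より大きい時 -> 下位の概念に差がある
--         if key > max(common_layer):
--             lower_flag = True
--
--     if upper_flag and lower_flag:
--         return "B4"
--     elif upper_flag:
--         return "B2"
--     elif lower_flag:
--         return "B1"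
--     else:
--         return None
-- ===== SOURCE B (Python) =====
-- def upper_or_lower_diff(common_layer, unique_keys):
--     if not unique_keys:
--         return None
--     cmin = min(common_layer)
--     cmax = max(common_layer)
--     upper_flag = min(unique_keys) < cmin
--     lower_flag = max(unique_keys) > cmax
--     if upper_flag and lower_flag:
--         return "B4"
--     elif upper_flag:
--         return "B2"
--     elif lower_flag:
--         return "B1"
--     else:
--         return None
-- ===== Notes on version B (the rewrite author's own statement) =====
-- stated objective: simpler
-- what changed: A scans every unique key, re-deriving common_layer's min/max per key; B reduces both lists to their extremes once and makes just two comparisons.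
import Mathlib
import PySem

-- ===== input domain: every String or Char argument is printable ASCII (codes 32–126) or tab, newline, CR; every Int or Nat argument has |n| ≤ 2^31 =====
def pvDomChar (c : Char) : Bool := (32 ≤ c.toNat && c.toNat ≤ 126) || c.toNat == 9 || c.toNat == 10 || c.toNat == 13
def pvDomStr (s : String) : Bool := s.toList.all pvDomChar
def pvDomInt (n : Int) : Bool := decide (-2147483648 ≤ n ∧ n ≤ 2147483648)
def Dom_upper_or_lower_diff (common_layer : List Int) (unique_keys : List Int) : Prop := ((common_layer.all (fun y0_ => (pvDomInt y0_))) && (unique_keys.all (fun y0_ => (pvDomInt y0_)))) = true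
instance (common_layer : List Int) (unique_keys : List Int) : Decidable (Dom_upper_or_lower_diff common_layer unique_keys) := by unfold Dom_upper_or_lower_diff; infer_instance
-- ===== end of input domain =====

-- ===== PORT A =====
-- A: per-key loop over unique_keys, recomputing min/max of common_layer inside the loop.
def upper_or_lower_diff (common_layer : List Int) (unique_keys : List Int) : Option String :=
  let fl := unique_keys.foldl (fun (fl : Bool × Bool) key =>
    (fl.1 || decide (key < (PySem.List.min? common_layer (fun x => x)).getD 0),
     fl.2 || decide (key > (PySem.List.max? common_layer (fun x => x)).getD 0))) (false, false)
  if fl.1 && fl.2 then some "B4"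
  else if fl.1 then some "B2"
  else if fl.2 then some "B1"
  else none

-- ===== PORT B =====
-- B: reduce both lists to their extremes once, then two comparisons.
def upper_or_lower_diff_alt (common_layer : List Int) (unique_keys : List Int) : Option String :=
  match unique_keys with
  | [] => none
  | _ :: _ =>
    let cmin := (PySem.List.min? common_layer (fun x => x)).getD 0
    let cmax := (PySem.List.max? common_layer (fun x => x)).getD 0
    let upper_flag := decide ((PySem.List.min? unique_keys (fun x => x)).getD 0 < cmin)
    let lower_flag := decide ((PySem.List.max? unique_keys (fun x => x)).getD 0 > cmax)
    if upper_flag && lower_flag then some "B4"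
    else if upper_flag then some "B2"
    else if lower_flag then some "B1"
    else none

-- ===== PRECONDITION & SPEC =====
-- Pre_ excludes exactly the inputs where Python A raises ValueError (min()/max() of empty
-- common_layer, reached iff unique_keys is nonempty); B raises there too.
def Pre_upper_or_lower_diff (common_layer : List Int) (unique_keys : List Int) : Prop :=
  unique_keys = [] ∨ common_layer ≠ []
instance (common_layer : List Int) (unique_keys : List Int) : Decidable (Pre_upper_or_lower_diff common_layer unique_keys) := by unfold Pre_upper_or_lower_diff; infer_instance

def pvWitness_upper_or_lower_diff : List Int × List Int := ([1, 5], [0, 9])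

def Spec_upper_or_lower_diff (common_layer : List Int) (unique_keys : List Int) (out : Option String) : Prop := out = upper_or_lower_diff_alt common_layer unique_keys
instance (common_layer : List Int) (unique_keys : List Int) (out : Option String) : Decidable (Spec_upper_or_lower_diff common_layer unique_keys out) := by unfold Spec_upper_or_lower_diff; infer_instance

-- ===== CLAIM (what is proved, stated in full; the proofs are below) =====
def Claim_equal_upper_or_lower_diff : Prop := ∀ (common_layer : List Int) (unique_keys : List Int), Dom_upper_or_lower_diff common_layer unique_keys → Pre_upper_or_lower_diff common_layer unique_keys → Spec_upper_or_lower_diff common_layer unique_keys (upper_or_lower_diff common_layer unique_keys)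

-- ===== LEMMAS AND PROOFS =====

-- A's loop accumulates exactly "some key is below m" / "some key is above M".
theorem foldl_flags (m M : Int) (u : List Int) (a b : Bool) :
    u.foldl (fun (fl : Bool × Bool) key =>
      (fl.1 || decide (key < m), fl.2 || decide (key > M))) (a, b)
    = (a || u.any (fun k => decide (k < m)), b || u.any (fun k => decide (k > M))) := by
  induction u generalizing a b with
  | nil => simp
  | cons h t ih => simp [List.any_cons, ih, Bool.or_assoc]

theorem min_lt_iff_any (u : List Int) (hu : u ≠ []) (m : Int) :
    ((PySem.List.min? u (fun x => x)).getD 0 < m) ↔ (u.any (fun k => decide (k < m)) = true) := by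
  obtain ⟨mu, hmu⟩ : ∃ mu, PySem.List.min? u (fun x => x) = some mu := by
    cases h : PySem.List.min? u (fun x => x) with
    | none => exact absurd ((PySem.List.min?_eq_none_iff _ _).mp h) hu
    | some mu => exact ⟨mu, rfl⟩
  rw [hmu]
  simp only [Option.getD_some, List.any_eq_true, decide_eq_true_eq]
  constructor
  · intro h; exact ⟨mu, PySem.List.min?_mem hmu, h⟩
  · rintro ⟨k, hk, hkm⟩
    exact lt_of_le_of_lt (PySem.List.min?_isMin hmu k hk) hkm

theorem max_gt_iff_any (u : List Int) (hu : u ≠ []) (M : Int) :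
    ((PySem.List.max? u (fun x => x)).getD 0 > M) ↔ (u.any (fun k => decide (k > M)) = true) := by
  obtain ⟨mu, hmu⟩ : ∃ mu, PySem.List.max? u (fun x => x) = some mu := by
    cases h : PySem.List.max? u (fun x => x) with
    | none => exact absurd ((PySem.List.max?_eq_none_iff _ _).mp h) hu
    | some mu => exact ⟨mu, rfl⟩
  rw [hmu]
  simp only [Option.getD_some, List.any_eq_true, decide_eq_true_eq]
  constructor
  · intro h; exact ⟨mu, PySem.List.max?_mem hmu, h⟩
  · rintro ⟨k, hk, hkm⟩
    exact lt_of_lt_of_le hkm (PySem.List.max?_isMax hmu k hk)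

-- ===== VERDICT (by name: the statement is the Claim_ definition above) =====
theorem upper_or_lower_diff_spec : Claim_equal_upper_or_lower_diff := by
  intro c u _ _
  unfold Spec_upper_or_lower_diff upper_or_lower_diff upper_or_lower_diff_alt
  cases u with
  | nil => simp
  | cons h t =>
    simp only [foldl_flags, Bool.false_or]
    have e1 : ((h :: t).any fun k => decide (k < (PySem.List.min? c fun x => x).getD 0))
        = decide ((PySem.List.min? (h :: t) fun x => x).getD 0 < (PySem.List.min? c fun x => x).getD 0) := by
      rw [Bool.eq_iff_iff]
      simp [min_lt_iff_any (h :: t) (by simp) ((PySem.List.min? c fun x => x).getD 0)]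
    have e2 : ((h :: t).any fun k => decide (k > (PySem.List.max? c fun x => x).getD 0))
        = decide ((PySem.List.max? (h :: t) fun x => x).getD 0 > (PySem.List.max? c fun x => x).getD 0) := by
      rw [Bool.eq_iff_iff]
      simp [max_gt_iff_any (h :: t) (by simp) ((PySem.List.max? c fun x => x).getD 0)]
    rw [e1, e2]
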